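-- pv_equiv track=rewrite | github.com/wwyyww/algorithm | Programmers/brute-force/모의고사.py | solution
-- ===== SOURCE A (Python) =====
-- def solution(answers):
--     answer = []
--     a=[1, 2, 3, 4, 5]
--     b=[2, 1, 2, 3, 2, 4, 2, 5]
--     c=[3, 3, 1, 1, 2, 2, 4, 4, 5, 5]
--
--     score = [0, 0, 0]
--
--     for idx, i in enumerate(answers):
--         if i==a[idx%5]:
--             score[0]+=1
--         if i==b[idx%8]:
--             score[1]+=1
--         if i==c[idx%10]:
--             score[2]+=1
--
--     mx=max(score)
--     for i in range(3):
--         if score[i]==mx: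
--             answer.append(i+1)
--
--
--     return answer
-- ===== SOURCE B (Python) =====
-- def solution(answers):
--     # Histogram of (position mod 40, value); 40 = lcm(5, 8, 10), so each
--     # pattern's hits depend only on the residue class mod 40.
--     cnt = {}
--     for idx, x in enumerate(answers):
--         key = (idx % 40, x)
--         cnt[key] = cnt.get(key, 0) + 1
--     patterns = [[1, 2, 3, 4, 5],
--                 [2, 1, 2, 3, 2, 4, 2, 5],
--                 [3, 3, 1, 1, 2, 2, 4, 4, 5, 5]]
--     scores = [sum(cnt.get((r, pat[r % len(pat)]), 0) for r in range(40))
--               for pat in patterns]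
--     mx = max(scores)
--     return [i + 1 for i in range(3) if scores[i] == mx]
-- ===== Notes on version B (the rewrite author's own statement) =====
-- stated objective: alternative
-- what changed: Replaces A's per-element comparison against the three cyclic patterns by a one-pass histogram keyed by (index mod 40, value) (40 = lcm of the pattern lengths), from which each pattern's score is recovered as a sum of 40 dictionary lookups.
import Mathlib
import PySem

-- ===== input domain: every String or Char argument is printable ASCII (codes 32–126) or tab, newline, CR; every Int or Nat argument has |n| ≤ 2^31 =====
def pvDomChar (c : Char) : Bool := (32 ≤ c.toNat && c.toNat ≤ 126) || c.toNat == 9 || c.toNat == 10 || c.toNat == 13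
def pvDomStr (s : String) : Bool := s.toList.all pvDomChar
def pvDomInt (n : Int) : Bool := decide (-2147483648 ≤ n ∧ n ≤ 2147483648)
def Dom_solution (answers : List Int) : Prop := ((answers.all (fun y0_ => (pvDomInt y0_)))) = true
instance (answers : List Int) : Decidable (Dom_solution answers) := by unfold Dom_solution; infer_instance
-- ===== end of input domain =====

-- B replaces A's interleaved per-element pattern comparisons by a one-pass histogram
-- keyed by (index mod 40, value) (40 = lcm(5,8,10)) plus 40 lookups per pattern;
-- a different data structure at the same O(n) cost ("alternative", not faster).


-- ===== PORT A =====
-- literal transliteration of A: one pass over enumerate(answers) updating the three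
-- counters together, then max(score) and the range(3) collection loop.
-- a[idx%5] etc. are ported with pyGetD; the index idx%m is always in range, so the
-- default is never consulted and the port is exact.
def solution (answers : List Int) : List Int :=
  let a : List Int := [1, 2, 3, 4, 5]
  let b : List Int := [2, 1, 2, 3, 2, 4, 2, 5]
  let c : List Int := [3, 3, 1, 1, 2, 2, 4, 4, 5, 5]
  let score : Int × Int × Int :=
    (PySem.List.enumerate answers 0).foldl
      (fun (s : Int × Int × Int) (p : Int × Int) =>
        let s := if p.2 = PySem.List.pyGetD a (PySem.Int.mod p.1 5) 0 then (s.1 + 1, s.2.1, s.2.2) else s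
        let s := if p.2 = PySem.List.pyGetD b (PySem.Int.mod p.1 8) 0 then (s.1, s.2.1 + 1, s.2.2) else s
        if p.2 = PySem.List.pyGetD c (PySem.Int.mod p.1 10) 0 then (s.1, s.2.1, s.2.2 + 1) else s)
      (0, 0, 0)
  let scoreL : List Int := [score.1, score.2.1, score.2.2]
  let mx : Int := (PySem.List.max? scoreL (fun x => x)).getD 0
  (PySem.List.pyRange 0 3 1).foldl
    (fun answer i => if PySem.List.pyGetD scoreL i 0 = mx then answer ++ [i + 1] else answer) []

-- ===== PORT B =====
-- the histogram loop of Source B: cnt[(idx % 40, x)] = cnt.get(key, 0) + 1 over enumerate(answers)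
def pvHist (answers : List Int) : PySem.Dict (Int × Int) Int :=
  (PySem.List.enumerate answers 0).foldl
    (fun d p =>
      let key : Int × Int := (PySem.Int.mod p.1 40, p.2)
      d.insert key (d.getD key 0 + 1))
    PySem.Dict.empty

-- sum(cnt.get((r, pat[r % len(pat)]), 0) for r in range(40))
def pvPatScore (cnt : PySem.Dict (Int × Int) Int) (pat : List Int) : Int :=
  ((PySem.List.pyRange 0 40 1).map
    (fun r => cnt.getD (r, PySem.List.pyGetD pat (PySem.Int.mod r (pat.length : Int)) 0) 0)).sum

def solution_alt (answers : List Int) : List Int :=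
  let cnt := pvHist answers
  let patterns : List (List Int) :=
    [[1, 2, 3, 4, 5], [2, 1, 2, 3, 2, 4, 2, 5], [3, 3, 1, 1, 2, 2, 4, 4, 5, 5]]
  let scores : List Int := patterns.map (fun pat => pvPatScore cnt pat)
  let mx : Int := (PySem.List.max? scores (fun x => x)).getD 0
  (PySem.List.pyRange 0 3 1).foldl
    (fun acc i => if PySem.List.pyGetD scores i 0 = mx then acc ++ [i + 1] else acc) []

-- ===== PRECONDITION & SPEC =====
def Spec_solution (answers : List Int) (out : List Int) : Prop := out = solution_alt answers
instance (answers : List Int) (out : List Int) : Decidable (Spec_solution answers out) := by unfold Spec_solution; infer_instance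

-- ===== CLAIM =====
def Claim_equal_solution : Prop := ∀ (answers : List Int), Dom_solution answers → Spec_solution answers (solution answers)

-- ===== LEMMAS AND PROOFS =====

-- the single-pattern step function of A's (split) fold
def pvF (pat : List Int) : Int → (Int × Int) → Int :=
  fun acc p => if p.2 = PySem.List.pyGetD pat (PySem.Int.mod p.1 (pat.length : Int)) 0 then acc + 1 else acc

lemma pvF_shift (pat : List Int) : ∀ (es : List (Int × Int)) (acc : Int),
    es.foldl (pvF pat) acc = acc + es.foldl (pvF pat) 0 := by
  intro es
  induction es with
  | nil => intro acc; simp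
  | cons p t ih =>
    intro acc
    simp only [List.foldl_cons]
    rw [ih (pvF pat acc p), ih (pvF pat 0 p)]
    unfold pvF
    split_ifs <;> omega

lemma triple_eq : ∀ (l : List Int) (s x y z : Int),
    (PySem.List.enumerate l s).foldl
      (fun (st : Int × Int × Int) (p : Int × Int) =>
        let st := if p.2 = PySem.List.pyGetD [1, 2, 3, 4, 5] (PySem.Int.mod p.1 5) 0 then (st.1 + 1, st.2.1, st.2.2) else st
        let st := if p.2 = PySem.List.pyGetD [2, 1, 2, 3, 2, 4, 2, 5] (PySem.Int.mod p.1 8) 0 then (st.1, st.2.1 + 1, st.2.2) else st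
        if p.2 = PySem.List.pyGetD [3, 3, 1, 1, 2, 2, 4, 4, 5, 5] (PySem.Int.mod p.1 10) 0 then (st.1, st.2.1, st.2.2 + 1) else st)
      (x, y, z)
    = (x + (PySem.List.enumerate l s).foldl (pvF [1, 2, 3, 4, 5]) 0,
       y + (PySem.List.enumerate l s).foldl (pvF [2, 1, 2, 3, 2, 4, 2, 5]) 0,
       z + (PySem.List.enumerate l s).foldl (pvF [3, 3, 1, 1, 2, 2, 4, 4, 5, 5]) 0) := by
  intro l
  induction l with
  | nil => intro s x y z; simp
  | cons h t ih =>
    intro s x y z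
    rw [PySem.List.enumerate_cons]
    simp only [List.foldl_cons]
    rw [ih, pvF_shift [1, 2, 3, 4, 5] _ (pvF [1, 2, 3, 4, 5] 0 (s, h)),
        pvF_shift [2, 1, 2, 3, 2, 4, 2, 5] _ (pvF [2, 1, 2, 3, 2, 4, 2, 5] 0 (s, h)),
        pvF_shift [3, 3, 1, 1, 2, 2, 4, 4, 5, 5] _ (pvF [3, 3, 1, 1, 2, 2, 4, 4, 5, 5] 0 (s, h))]
    unfold pvF
    simp only [List.length_cons, List.length_nil]
    norm_num
    split_ifs <;> simp <;> omega

-- histogram lookup = count of the key among the mapped (idx mod 40, value) pairs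
lemma hist_getD (answers : List Int) (k : Int × Int) :
    (pvHist answers).getD k 0 =
      (((PySem.List.enumerate answers 0).map (fun p => (PySem.Int.mod p.1 40, p.2))).count k : Int) := by
  have h1 : pvHist answers
      = (((PySem.List.enumerate answers 0).map (fun p => (PySem.Int.mod p.1 40, p.2))).foldl
          (fun (d : PySem.Dict (Int × Int) Int) x => d.insert x (d.getD x 0 + 1)) PySem.Dict.empty) := by
    unfold pvHist
    rw [List.foldl_map]
  rw [h1, PySem.Dict.getD_foldl_insert_add_one]
  simp [PySem.Dict.getD_empty]

-- generic: a sum over rs of per-element indicators equals a countP, when each element's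
-- indicator row sums to its p-indicator
lemma sum_map_countP {α : Type} (rs : List Int) (q : Int → α → Bool) (p : α → Bool) :
    ∀ (l : List α),
      (∀ e ∈ l, (rs.map (fun r => if q r e then (1 : Int) else 0)).sum = if p e then 1 else 0) →
      (rs.map (fun r => (l.countP (q r) : Int))).sum = (l.countP p : Int) := by
  intro l
  induction l with
  | nil => intro _; simp
  | cons e t ih =>
    intro h
    have hrow := h e (List.mem_cons_self)
    have ht := ih (fun x hx => h x (List.mem_cons_of_mem _ hx))
    have : (rs.map (fun r => ((e :: t).countP (q r) : Int))).sum
        = (rs.map (fun r => (t.countP (q r) : Int) + (if q r e then (1 : Int) else 0))).sum := by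
      congr 1
      apply List.map_congr_left
      intro r _
      rw [List.countP_cons]
      split_ifs <;> push_cast <;> ring
    rw [this, PySem.List.sum_map_add_int, ht, hrow, List.countP_cons]
    split_ifs <;> push_cast <;> ring
  
-- row sum of pair-equality indicators over a nodup list containing v
lemma sum_indicator_pair (g : Int → Int) (v y : Int) :  ∀ (rs : List Int), rs.Nodup → v ∈ rs →
    (rs.map (fun r => if ((v, y) : Int × Int) = (r, g r) then (1 : Int) else 0)).sum
      = if y = g v then 1 else 0 := by
  intro rs
  induction rs with
  | nil => intro _ hv; cases hv
  | cons r t ih =>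
    intro hnd hv
    simp only [List.nodup_cons] at hnd
    simp only [List.map_cons, List.sum_cons]
    by_cases hrv : r = v
    · subst hrv
      have hz : (t.map (fun r' => if ((r, y) : Int × Int) = (r', g r') then (1 : Int) else 0)).sum = 0 := by
        apply List.sum_eq_zero
        intro x hx
        simp only [List.mem_map] at hx
        obtain ⟨r', hr', hx⟩ := hx
        have : ¬ (((r, y) : Int × Int) = (r', g r')) := by
          intro hc
          injection hc with h1 _
          subst h1
          exact hnd.1 hr'
        simp [this] at hx
        omega
      rw [hz]
      by_cases hy : y = g r
      · simp [hy]
      · have : ¬ (((r, y) : Int × Int) = (r, g r)) := by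
          simp [Prod.ext_iff, hy]
        simp [this, hy]
    · have hvt : v ∈ t := by
        rcases List.mem_cons.mp hv with h | h
        · exact absurd h.symm hrv
        · exact h
      rw [ih hnd.2 hvt]
      have : ¬ (((v, y) : Int × Int) = (r, g r)) := by
        simp [Prod.ext_iff]
        intro hc; exact absurd hc.symm hrv
      simp [this]

lemma mod_mod_40 (i : Int) (L : Int) (hpos : 0 < L) (hdvd : L ∣ 40) :
    PySem.Int.mod (PySem.Int.mod i 40) L = PySem.Int.mod i L := by
  rw [PySem.Int.mod_eq_emod_of_pos (by omega : (0:Int) < 40),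
      PySem.Int.mod_eq_emod_of_pos hpos, PySem.Int.mod_eq_emod_of_pos hpos]
  exact Int.emod_emod_of_dvd i hdvd

-- the per-pattern bridge: B's 40 histogram lookups = A's single-pattern count
lemma score_eq (answers pat : List Int) (hpos : 0 < pat.length)
    (hdvd : ((pat.length : Int)) ∣ 40) :
    pvPatScore (pvHist answers) pat = (PySem.List.enumerate answers 0).foldl (pvF pat) 0 := by
  have hL : (0 : Int) < (pat.length : Int) := by exact_mod_cast hpos
  unfold pvPatScore
  have hA : (PySem.List.enumerate answers 0).foldl (pvF pat) 0
      = (((PySem.List.enumerate answers 0).countP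
          (fun p => decide (p.2 = PySem.List.pyGetD pat (PySem.Int.mod p.1 (pat.length : Int)) 0))) : Int) := by
    unfold pvF
    rw [PySem.List.foldl_ite_add_one]
    ring
  rw [hA]
  -- rewrite each lookup as a count, then as a countP over the enumerate list
  have hmap : ((PySem.List.pyRange 0 40 1).map
      (fun r => (pvHist answers).getD (r, PySem.List.pyGetD pat (PySem.Int.mod r (pat.length : Int)) 0) 0))
      = ((PySem.List.pyRange 0 40 1).map
      (fun r => ((PySem.List.enumerate answers 0).countP
          (fun e => decide (((PySem.Int.mod e.1 40, e.2) : Int × Int)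
              = (r, PySem.List.pyGetD pat (PySem.Int.mod r (pat.length : Int)) 0))) : Int))) := by
    apply List.map_congr_left
    intro r _
    rw [hist_getD]
    rw [List.count_eq_countP, List.countP_map]
    congr 1
    apply List.countP_congr
    intro x _
    simp
  rw [hmap]
  apply sum_map_countP
  intro e _
  simp only [decide_eq_true_eq]
  rw [sum_indicator_pair (fun r => PySem.List.pyGetD pat (PySem.Int.mod r (pat.length : Int)) 0)
        (PySem.Int.mod e.1 40) e.2 (PySem.List.pyRange 0 40 1)
        (PySem.List.nodup_pyRange_one 0 40)
        (PySem.List.mem_pyRange_one.mpr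
          ⟨PySem.Int.mod_nonneg e.1 (by omega), PySem.Int.mod_lt e.1 (by omega)⟩)]
  rw [mod_mod_40 e.1 (pat.length : Int) hL hdvd]

-- ===== VERDICT =====
theorem solution_spec : Claim_equal_solution := by
  intro answers _
  unfold Spec_solution solution solution_alt
  simp only [List.map_cons, List.map_nil]
  rw [triple_eq answers 0 0 0 0]
  simp only [zero_add,
      ← score_eq answers [1, 2, 3, 4, 5] (by decide) (by decide),
      ← score_eq answers [2, 1, 2, 3, 2, 4, 2, 5] (by decide) (by decide),
      ← score_eq answers [3, 3, 1, 1, 2, 2, 4, 4, 5, 5] (by decide) (by decide)]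
  rfl
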